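-- pv_equiv track=rewrite | github.com/siva-bathula/Brilliant | AlternateSolutionsInPython/AdventOfCode/2016/Day12.py | solve
-- ===== SOURCE A (Python) =====
-- def cpy(params, registers, pc):
--     value, dest = params.split()
--     try:
--         registers[dest] = int(value)
--     except Exception:
--         registers[dest] = registers[value]
--     return registers, pc + 1
--
-- def inc(params, registers, pc):
--     dest = params.strip()
--     registers[dest] += 1
--     return registers, pc + 1
--
-- def dec(params, registers, pc):
--     dest = params.strip()
--     registers[dest] -= 1
--     return registers, pc + 1
--
-- def jnz(params, registers, pc):
--     register, distance = params.split()
--     try: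
--         value = int(register)
--     except Exception:
--         value = registers[register]
--     if value != 0:
--         return registers, pc + int(distance)
--     else:
--         return registers, pc + 1
--
-- def solve(data, c=0):
--     instruction_set = {
--         'cpy': cpy,
--         'inc': inc,
--         'dec': dec,
--         'jnz': jnz,
--     }
--     registers = {'a': 0, 'b': 0, 'c': c, 'd': 0}
--
--     pc = 0
--     while True:
--         try:
--             instruction = data[pc]
--         except IndexError:
--             break
--         action = instruction[:3]
--         registers, pc = instruction_set[action](instruction[4:], registers, pc)
--
--     return registers
-- ===== SOURCE B (Python) =====
-- def solve(data, c=0):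
--     # Compile the program once to bytecode (opcode tags with operands resolved
--     # to register slots or int literals), then execute the bytecode with a
--     # bounds-checked loop; no string work or exception handling per step.
--     REG = {'a': 0, 'b': 1, 'c': 2, 'd': 3}
--
--     def operand(tok):
--         return ('r', REG[tok]) if tok in REG else ('v', int(tok))
--
--     prog = []
--     for line in data:
--         op, rest = line[:3], line[4:]
--         if op == 'cpy':
--             s, d = rest.split()
--             prog.append(('cpy', operand(s), REG[d]))
--         elif op == 'inc':
--             prog.append(('inc', REG[rest.strip()]))
--         elif op == 'dec':
--             prog.append(('dec', REG[rest.strip()]))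
--         elif op == 'jnz':
--             s, d = rest.split()
--             prog.append(('jnz', operand(s), int(d)))
--         else:
--             raise KeyError(op)
--
--     regs = [0, 0, c, 0]
--
--     def value(arg):
--         kind, x = arg
--         return regs[x] if kind == 'r' else x
--
--     pc = 0
--     n = len(prog)
--     while 0 <= pc < n:
--         ins = prog[pc]
--         tag = ins[0]
--         if tag == 'cpy':
--             regs[ins[2]] = value(ins[1])
--             pc += 1
--         elif tag == 'inc':
--             regs[ins[1]] += 1
--             pc += 1
--         elif tag == 'dec':
--             regs[ins[1]] -= 1
--             pc += 1
--         else: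
--             pc += ins[2] if value(ins[1]) != 0 else 1
--     return {'a': regs[0], 'b': regs[1], 'c': regs[2], 'd': regs[3]}
-- ===== Notes on version B (the rewrite author's own statement) =====
-- stated objective: alternative
-- what changed: B compiles the program once into bytecode (opcode tags with operands pre-resolved to register slots or int literals) and then executes that bytecode with a bounds-checked loop over four plain register slots, instead of A's per-step string slicing/splitting, try/except int-vs-register tests, dict-of-helper-functions dispatch and IndexError-driven loop exit; …
-- outside the precondition, e.g. on solve(['jnz 1 2', 'foo'], 0): A returns {'a': 0, 'b': 0, 'c': 0, 'd': 0}, B raises KeyError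
import Mathlib
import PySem

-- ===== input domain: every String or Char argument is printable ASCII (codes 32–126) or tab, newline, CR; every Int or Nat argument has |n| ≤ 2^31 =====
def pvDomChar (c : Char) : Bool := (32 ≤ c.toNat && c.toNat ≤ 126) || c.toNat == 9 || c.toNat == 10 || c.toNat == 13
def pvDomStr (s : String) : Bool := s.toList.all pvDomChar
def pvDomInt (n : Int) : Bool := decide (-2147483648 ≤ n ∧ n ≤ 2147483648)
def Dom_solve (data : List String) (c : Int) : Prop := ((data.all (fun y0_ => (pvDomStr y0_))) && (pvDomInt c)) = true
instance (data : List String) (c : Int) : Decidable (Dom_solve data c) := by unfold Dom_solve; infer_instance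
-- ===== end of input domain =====

-- B compiles the program once to bytecode (operands resolved to register slots or
-- int literals) and executes that, instead of A's per-step string parsing with a
-- dict of helper functions and exception-driven control flow (alternative, same cost).


-- both ports totalize their Python's unbounded while-loop with the same fuel bound;
-- fuel is consumed once per executed instruction, so it only caps (identically on both
-- sides) runs of more than 2^32 steps
def pvFuel : Nat := 4294967296

-- ===== PORT A =====
-- helper cpy: `value, dest = params.split(); try: registers[dest]=int(value) except: registers[dest]=registers[value]`
-- (the `_ => ` ValueError branch and the `.getD 0` KeyError totalize raises; both are excluded by Pre_solve)
def pvCpy (params : String) (registers : PySem.Dict String Int) (pc : Int) :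
    PySem.Dict String Int × Int :=
  match PySem.Str.split₀ params with
  | [value, dest] =>
    match PySem.Int.ofStr? value with
    | some n => (registers.insert dest n, pc + 1)
    | none => (registers.insert dest ((registers.get? value).getD 0), pc + 1)
  | _ => (registers, pc + 1)

-- helper inc: `dest = params.strip(); registers[dest] += 1` (KeyError totalized with getD, excluded by Pre_solve)
def pvInc (params : String) (registers : PySem.Dict String Int) (pc : Int) :
    PySem.Dict String Int × Int :=
  (registers.insert (PySem.Str.strip params) (registers.getD (PySem.Str.strip params) 0 + 1), pc + 1)

-- helper dec: like inc with -1
def pvDec (params : String) (registers : PySem.Dict String Int) (pc : Int) :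
    PySem.Dict String Int × Int :=
  (registers.insert (PySem.Str.strip params) (registers.getD (PySem.Str.strip params) 0 - 1), pc + 1)

-- helper jnz: `register, distance = params.split(); value = int(register) or registers[register]; jump`
-- (the `.getD 0` on int(distance) totalizes its ValueError, excluded by Pre_solve)
def pvJnz (params : String) (registers : PySem.Dict String Int) (pc : Int) :
    PySem.Dict String Int × Int :=
  match PySem.Str.split₀ params with
  | [register, distance] =>
    let value : Int :=
      match PySem.Int.ofStr? register with
      | some n => n
      | none => (registers.get? register).getD 0
    if value ≠ 0 then (registers, pc + (PySem.Int.ofStr? distance).getD 0)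
    else (registers, pc + 1)
  | _ => (registers, pc + 1)

-- the instruction_set dispatch on instruction[:3] (KeyError on an unknown opcode totalized by
-- returning the state unchanged; excluded by Pre_solve)
def pvStep (instruction : String) (registers : PySem.Dict String Int) (pc : Int) :
    PySem.Dict String Int × Int :=
  if PySem.Str.slice instruction none (some 3) == "cpy" then
    pvCpy (PySem.Str.slice instruction (some 4) none) registers pc
  else if PySem.Str.slice instruction none (some 3) == "inc" then
    pvInc (PySem.Str.slice instruction (some 4) none) registers pc
  else if PySem.Str.slice instruction none (some 3) == "dec" then
    pvDec (PySem.Str.slice instruction (some 4) none) registers pc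
  else if PySem.Str.slice instruction none (some 3) == "jnz" then
    pvJnz (PySem.Str.slice instruction (some 4) none) registers pc
  else (registers, pc)

-- the `while True` loop: `data[pc]` is pyGet? (negative pc indexes from the end, like Python);
-- IndexError (`none`) breaks; fuel = pvFuel totalizes the loop
def pvRun (data : List String) (fuel : Nat) (registers : PySem.Dict String Int) (pc : Int) :
    PySem.Dict String Int :=
  match fuel with
  | 0 => registers
  | f + 1 =>
    match PySem.List.pyGet? data pc with
    | none => registers
    | some instruction =>
      pvRun data f (pvStep instruction registers pc).1 (pvStep instruction registers pc).2

def solve (data : List String) (c : Int) : List (String × Int) :=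
  (pvRun data pvFuel
    (PySem.Dict.ofList [("a", 0), ("b", 0), ("c", c), ("d", 0)]) 0).items

-- ===== PORT B =====
-- bytecode: operands are a register slot or an int literal
inductive PvArg
  | reg : Nat → PvArg
  | val : Int → PvArg
deriving DecidableEq, Repr

-- compiled instruction; `.bad` marks a line on which Source B's compile pass RAISES
-- (KeyError/ValueError/unpacking), excluded by Pre_solve
inductive PvIns
  | cpy : PvArg → Nat → PvIns
  | inc : Nat → PvIns
  | dec : Nat → PvIns
  | jnz : PvArg → Int → PvIns
  | bad : PvIns
deriving DecidableEq, Repr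

-- `tok in REG` test of Source B
def regTok (t : String) : Bool := t == "a" || t == "b" || t == "c" || t == "d"

-- REG[tok] (the else-arm 4 is never produced under regTok = true)
def regIdx (t : String) : Nat :=
  if t == "a" then 0 else if t == "b" then 1 else if t == "c" then 2
  else if t == "d" then 3 else 4

-- `('r', REG[tok]) if tok in REG else ('v', int(tok))` (int() ValueError guarded by okTok in compileIns)
def pvArgOf (t : String) : PvArg :=
  if regTok t then .reg (regIdx t) else .val ((PySem.Int.ofStr? t).getD 0)

-- token accepted by operand(): register name or int literal
def okTok (t : String) : Bool := (PySem.Int.ofStr? t).isSome || regTok t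

-- one line of Source B's compile loop; every `else .bad` is a raise of the Python
def compileIns (s : String) : PvIns :=
  if PySem.Str.slice s none (some 3) == "cpy" then
    match PySem.Str.split₀ (PySem.Str.slice s (some 4) none) with
    | [v, d] => if okTok v && regTok d then .cpy (pvArgOf v) (regIdx d) else .bad
    | _ => .bad
  else if PySem.Str.slice s none (some 3) == "inc" then
    if regTok (PySem.Str.strip (PySem.Str.slice s (some 4) none)) then
      .inc (regIdx (PySem.Str.strip (PySem.Str.slice s (some 4) none))) else .bad
  else if PySem.Str.slice s none (some 3) == "dec" then
    if regTok (PySem.Str.strip (PySem.Str.slice s (some 4) none)) then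
      .dec (regIdx (PySem.Str.strip (PySem.Str.slice s (some 4) none))) else .bad
  else if PySem.Str.slice s none (some 3) == "jnz" then
    match PySem.Str.split₀ (PySem.Str.slice s (some 4) none) with
    | [v, d] =>
      match PySem.Int.ofStr? d with
      | some k => if okTok v then .jnz (pvArgOf v) k else .bad
      | none => .bad
    | _ => .bad
  else .bad

-- regs[i] / regs[i] = v on the four slots (out-of-range i never occurs under Pre_solve)
def getR : Int × Int × Int × Int → Nat → Int
  | (a, _, _, _), 0 => a
  | (_, b, _, _), 1 => b
  | (_, _, c, _), 2 => c
  | (_, _, _, d), 3 => d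
  | _, _ => 0

def setR : Int × Int × Int × Int → Nat → Int → Int × Int × Int × Int
  | (_, b, c, d), 0, v => (v, b, c, d)
  | (a, _, c, d), 1, v => (a, v, c, d)
  | (a, b, _, d), 2, v => (a, b, v, d)
  | (a, b, c, _), 3, v => (a, b, c, v)
  | t, _, _ => t

-- value(arg) of Source B
def argValB (t : Int × Int × Int × Int) : PvArg → Int
  | .reg i => getR t i
  | .val n => n

-- Source B's `while 0 <= pc < n` loop over the bytecode; same fuel totalization as pvRun
def altRun (prog : List PvIns) (fuel : Nat) (t : Int × Int × Int × Int) (pc : Int) :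
    Int × Int × Int × Int :=
  match fuel with
  | 0 => t
  | f + 1 =>
    if pc < 0 ∨ (prog.length : Int) ≤ pc then t
    else
      match prog[pc.toNat]? with
      | none => t
      | some (.cpy a i) => altRun prog f (setR t i (argValB t a)) (pc + 1)
      | some (.inc i) => altRun prog f (setR t i (getR t i + 1)) (pc + 1)
      | some (.dec i) => altRun prog f (setR t i (getR t i - 1)) (pc + 1)
      | some (.jnz a k) => altRun prog f t (pc + if argValB t a ≠ 0 then k else 1)
      | some .bad => t

-- `return {'a': regs[0], 'b': regs[1], 'c': regs[2], 'd': regs[3]}`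
def out4 (t : Int × Int × Int × Int) : List (String × Int) :=
  [("a", t.1), ("b", t.2.1), ("c", t.2.2.1), ("d", t.2.2.2)]

def solve_alt (data : List String) (c : Int) : List (String × Int) :=
  out4 (altRun (data.map compileIns) pvFuel (0, 0, c, 0) 0)

-- ===== PRECONDITION & SPEC =====
-- line i of a program of length n, as A parses it (slice [:3] / [4:])
def okInstrAt (n i : Nat) (s : String) : Bool :=
  if PySem.Str.slice s none (some 3) == "cpy" then
    match PySem.Str.split₀ (PySem.Str.slice s (some 4) none) with
    | [v, d] => okTok v && regTok d
    | _ => false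
  else if PySem.Str.slice s none (some 3) == "inc" then
    regTok (PySem.Str.strip (PySem.Str.slice s (some 4) none))
  else if PySem.Str.slice s none (some 3) == "dec" then
    regTok (PySem.Str.strip (PySem.Str.slice s (some 4) none))
  else if PySem.Str.slice s none (some 3) == "jnz" then
    match PySem.Str.split₀ (PySem.Str.slice s (some 4) none) with
    | [r, ds] =>
      okTok r &&
        (match PySem.Int.ofStr? ds with
         | some k => decide (0 ≤ (i : Int) + k ∨ (i : Int) + k < -(n : Int))
         | none => false)
    | _ => false
  else false

def okProgFrom (n : Nat) : Nat → List String → Bool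
  | _, [] => true
  | i, s :: rest => okInstrAt n i s && okProgFrom n (i + 1) rest

-- Pre_solve excludes (a) programs containing a malformed or unknown-register line (A raises
-- KeyError/ValueError when it executes such a line — or returns untouched registers if it is
-- never executed, while B's compile pass raises on it up front), and (b) programs with a jnz
-- whose literal offset can land on a negative in-range index, where A continuing execution
-- via Python's negative-index wraparound of data[pc] is an accident of the implementation.
def Pre_solve (data : List String) (c : Int) : Prop :=
  okProgFrom data.length 0 data = true

instance (data : List String) (c : Int) : Decidable (Pre_solve data c) := by
  unfold Pre_solve; infer_instance

def pvWitness_solve : List String × Int :=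
  (["cpy 2 a", "inc b", "dec a", "jnz a -2", "jnz 1 3", "inc d"], 1)

def Spec_solve (data : List String) (c : Int) (out : List (String × Int)) : Prop := out = solve_alt data c
instance (data : List String) (c : Int) (out : List (String × Int)) : Decidable (Spec_solve data c out) := by unfold Spec_solve; infer_instance

-- ===== CLAIM (what is proved, stated in full; the proofs are below) =====
def Claim_equal_solve : Prop := ∀ (data : List String) (c : Int), Dom_solve data c → Pre_solve data c → Spec_solve data c (solve data c)

-- ===== LEMMAS AND PROOFS =====
def mk4 (a b c d : Int) : PySem.Dict String Int :=
  PySem.Dict.ofList [("a", a), ("b", b), ("c", c), ("d", d)]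

theorem okProgFrom_get (n : Nat) :
    ∀ (l : List String) (i j : Nat) (s : String),
      okProgFrom n i l = true → l[j]? = some s → okInstrAt n (i + j) s = true := by
  intro l
  induction l with
  | nil => intro i j s _ hg; simp at hg
  | cons x xs ih =>
    intro i j s h hg
    rw [okProgFrom, Bool.and_eq_true] at h
    cases j with
    | zero =>
      simp at hg
      subst hg
      simpa using h.1
    | succ j =>
      simp at hg
      have := ih (i + 1) j s h.2 hg
      have hij : i + (j + 1) = (i + 1) + j := by omega
      rw [hij]
      exact this

theorem regTok_cases (t : String) (h : regTok t = true) :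
    t = "a" ∨ t = "b" ∨ t = "c" ∨ t = "d" := by
  simp [regTok] at h; tauto

-- an int literal is never a register name
theorem ofStr_not_reg (t : String) (n : Int)
    (h : PySem.Int.ofStr? t = some n) : regTok t = false := by
  rcases hr : regTok t with _ | _
  · rfl
  · rcases regTok_cases t hr with rfl | rfl | rfl | rfl <;>
      simp [show PySem.Int.ofStr? "a" = none from rfl,
            show PySem.Int.ofStr? "b" = none from rfl,
            show PySem.Int.ofStr? "c" = none from rfl,
            show PySem.Int.ofStr? "d" = none from rfl] at h

-- the two ports read the same operand value out of their register states
theorem val_eq (a b c d : Int) (t : String) (h : okTok t = true) :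
    (match PySem.Int.ofStr? t with
     | some n => n
     | none => ((mk4 a b c d).get? t).getD 0) = argValB (a, b, c, d) (pvArgOf t) := by
  rcases hv : PySem.Int.ofStr? t with _ | n
  · simp [okTok, hv] at h
    rcases regTok_cases t h with rfl | rfl | rfl | rfl <;> rfl
  · rw [pvArgOf, ofStr_not_reg t n hv]
    simp [hv, argValB]

-- one-step reduction lemmas for A's loop
theorem pvRun_succ_none (data : List String) (f : Nat) (regs : PySem.Dict String Int)
    (pc : Int) (h : PySem.List.pyGet? data pc = none) :
    pvRun data (f + 1) regs pc = regs := by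
  rw [pvRun, h]

theorem pvRun_succ_some (data : List String) (f : Nat) (regs : PySem.Dict String Int)
    (pc : Int) (ins : String) (h : PySem.List.pyGet? data pc = some ins) :
    pvRun data (f + 1) regs pc =
      pvRun data f (pvStep ins regs pc).1 (pvStep ins regs pc).2 := by
  rw [pvRun, h]

-- one-step reduction lemmas for B's loop
theorem altRun_succ_out (prog : List PvIns) (f : Nat) (t : Int × Int × Int × Int)
    (pc : Int) (h : pc < 0 ∨ (prog.length : Int) ≤ pc) :
    altRun prog (f + 1) t pc = t := by
  rw [altRun, if_pos h]

theorem altRun_succ_cpy (prog : List PvIns) (f : Nat) (t : Int × Int × Int × Int)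
    (pc : Int) (a : PvArg) (i : Nat)
    (hn : ¬ (pc < 0 ∨ (prog.length : Int) ≤ pc))
    (h : prog[pc.toNat]? = some (.cpy a i)) :
    altRun prog (f + 1) t pc = altRun prog f (setR t i (argValB t a)) (pc + 1) := by
  rw [altRun, if_neg hn, h]

theorem altRun_succ_inc (prog : List PvIns) (f : Nat) (t : Int × Int × Int × Int)
    (pc : Int) (i : Nat)
    (hn : ¬ (pc < 0 ∨ (prog.length : Int) ≤ pc))
    (h : prog[pc.toNat]? = some (.inc i)) :
    altRun prog (f + 1) t pc = altRun prog f (setR t i (getR t i + 1)) (pc + 1) := by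
  rw [altRun, if_neg hn, h]

theorem altRun_succ_dec (prog : List PvIns) (f : Nat) (t : Int × Int × Int × Int)
    (pc : Int) (i : Nat)
    (hn : ¬ (pc < 0 ∨ (prog.length : Int) ≤ pc))
    (h : prog[pc.toNat]? = some (.dec i)) :
    altRun prog (f + 1) t pc = altRun prog f (setR t i (getR t i - 1)) (pc + 1) := by
  rw [altRun, if_neg hn, h]

theorem altRun_succ_jnz (prog : List PvIns) (f : Nat) (t : Int × Int × Int × Int)
    (pc : Int) (a : PvArg) (k : Int)
    (hn : ¬ (pc < 0 ∨ (prog.length : Int) ≤ pc))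
    (h : prog[pc.toNat]? = some (.jnz a k)) :
    altRun prog (f + 1) t pc = altRun prog f t (pc + if argValB t a ≠ 0 then k else 1) := by
  rw [altRun, if_neg hn, h]

-- A's dispatch reduced to each helper
theorem pvStep_cpy (ins : String) (regs : PySem.Dict String Int) (pc : Int)
    (h1 : (PySem.Str.slice ins none (some 3) == "cpy") = true) :
    pvStep ins regs pc = pvCpy (PySem.Str.slice ins (some 4) none) regs pc := by
  unfold pvStep; rw [if_pos h1]

theorem pvStep_inc (ins : String) (regs : PySem.Dict String Int) (pc : Int)
    (h1 : ¬ (PySem.Str.slice ins none (some 3) == "cpy") = true)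
    (h2 : (PySem.Str.slice ins none (some 3) == "inc") = true) :
    pvStep ins regs pc = pvInc (PySem.Str.slice ins (some 4) none) regs pc := by
  unfold pvStep; rw [if_neg h1, if_pos h2]

theorem pvStep_dec (ins : String) (regs : PySem.Dict String Int) (pc : Int)
    (h1 : ¬ (PySem.Str.slice ins none (some 3) == "cpy") = true)
    (h2 : ¬ (PySem.Str.slice ins none (some 3) == "inc") = true)
    (h3 : (PySem.Str.slice ins none (some 3) == "dec") = true) :
    pvStep ins regs pc = pvDec (PySem.Str.slice ins (some 4) none) regs pc := by
  unfold pvStep; rw [if_neg h1, if_neg h2, if_pos h3]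

theorem pvStep_jnz (ins : String) (regs : PySem.Dict String Int) (pc : Int)
    (h1 : ¬ (PySem.Str.slice ins none (some 3) == "cpy") = true)
    (h2 : ¬ (PySem.Str.slice ins none (some 3) == "inc") = true)
    (h3 : ¬ (PySem.Str.slice ins none (some 3) == "dec") = true)
    (h4 : (PySem.Str.slice ins none (some 3) == "jnz") = true) :
    pvStep ins regs pc = pvJnz (PySem.Str.slice ins (some 4) none) regs pc := by
  unfold pvStep; rw [if_neg h1, if_neg h2, if_neg h3, if_pos h4]

theorem pvCpy_eq (params : String) (regs : PySem.Dict String Int) (pc : Int)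
    (v dst : String) (hsp : PySem.Str.split₀ params = [v, dst]) :
    pvCpy params regs pc =
      (regs.insert dst
        (match PySem.Int.ofStr? v with
         | some n => n
         | none => (regs.get? v).getD 0), pc + 1) := by
  unfold pvCpy; rw [hsp]
  rcases h : PySem.Int.ofStr? v with _ | n <;> simp [h]

theorem pvJnz_eq (params : String) (regs : PySem.Dict String Int) (pc : Int)
    (r dist : String) (hsp : PySem.Str.split₀ params = [r, dist]) :
    pvJnz params regs pc =
      (if (match PySem.Int.ofStr? r with
           | some n => n
           | none => (regs.get? r).getD 0) ≠ 0 then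
        (regs, pc + (PySem.Int.ofStr? dist).getD 0)
      else (regs, pc + 1)) := by
  unfold pvJnz; rw [hsp]

-- B's compile pass reduced on each well-formed line shape
theorem compileIns_cpy (s v d : String)
    (h1 : (PySem.Str.slice s none (some 3) == "cpy") = true)
    (hsp : PySem.Str.split₀ (PySem.Str.slice s (some 4) none) = [v, d])
    (hv : okTok v = true) (hd : regTok d = true) :
    compileIns s = .cpy (pvArgOf v) (regIdx d) := by
  unfold compileIns; rw [if_pos h1, hsp]; simp [hv, hd]

theorem compileIns_inc (s : String)
    (h1 : ¬ (PySem.Str.slice s none (some 3) == "cpy") = true)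
    (h2 : (PySem.Str.slice s none (some 3) == "inc") = true)
    (hr : regTok (PySem.Str.strip (PySem.Str.slice s (some 4) none)) = true) :
    compileIns s = .inc (regIdx (PySem.Str.strip (PySem.Str.slice s (some 4) none))) := by
  unfold compileIns; rw [if_neg h1, if_pos h2, if_pos hr]

theorem compileIns_dec (s : String)
    (h1 : ¬ (PySem.Str.slice s none (some 3) == "cpy") = true)
    (h2 : ¬ (PySem.Str.slice s none (some 3) == "inc") = true)
    (h3 : (PySem.Str.slice s none (some 3) == "dec") = true)
    (hr : regTok (PySem.Str.strip (PySem.Str.slice s (some 4) none)) = true) :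
    compileIns s = .dec (regIdx (PySem.Str.strip (PySem.Str.slice s (some 4) none))) := by
  unfold compileIns; rw [if_neg h1, if_neg h2, if_pos h3, if_pos hr]

theorem compileIns_jnz (s v d : String) (k : Int)
    (h1 : ¬ (PySem.Str.slice s none (some 3) == "cpy") = true)
    (h2 : ¬ (PySem.Str.slice s none (some 3) == "inc") = true)
    (h3 : ¬ (PySem.Str.slice s none (some 3) == "dec") = true)
    (h4 : (PySem.Str.slice s none (some 3) == "jnz") = true)
    (hsp : PySem.Str.split₀ (PySem.Str.slice s (some 4) none) = [v, d])
    (hk : PySem.Int.ofStr? d = some k) (hv : okTok v = true) :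
    compileIns s = .jnz (pvArgOf v) k := by
  unfold compileIns; rw [if_neg h1, if_neg h2, if_neg h3, if_pos h4, hsp]; simp [hk, hv]

set_option maxHeartbeats 1600000 in
theorem run_eq (data : List String) (hpre : okProgFrom data.length 0 data = true) :
    ∀ (fuel : Nat) (pc a b c d : Int),
      (0 ≤ pc ∨ pc < -(data.length : Int)) →
      (pvRun data fuel (mk4 a b c d) pc).items =
        out4 (altRun (data.map compileIns) fuel (a, b, c, d) pc) := by
  intro fuel
  induction fuel with
  | zero => intro pc a b c d _; rfl
  | succ f ih =>
    intro pc a b c d hpc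
    have hlen : ((data.map compileIns).length : Int) = (data.length : Int) := by simp
    rcases hpc with hpc | hpc
    · rcases hget : data[pc.toNat]? with _ | ins
      · have hle : (data.length : Int) ≤ pc := by
          have := List.getElem?_eq_none_iff.mp hget; omega
        rw [pvRun_succ_none data f _ pc
              (by rw [PySem.List.pyGet?_of_nonneg data hpc, hget]),
            altRun_succ_out _ f _ pc (Or.inr (by omega))]
        rfl
      · have hlt : pc.toNat < data.length := (List.getElem?_eq_some_iff.mp hget).1
        have hnlt : ¬ (pc < 0 ∨ ((data.map compileIns).length : Int) ≤ pc) := by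
          rw [hlen]; omega
        have hmget : (data.map compileIns)[pc.toNat]? = some (compileIns ins) := by
          rw [List.getElem?_map, hget]; rfl
        have hok := okProgFrom_get data.length data 0 pc.toNat ins hpre hget
        rw [Nat.zero_add] at hok
        have hcast : ((pc.toNat : Nat) : Int) = pc := Int.toNat_of_nonneg hpc
        rw [okInstrAt] at hok
        rw [pvRun_succ_some data f _ pc ins
              (by rw [PySem.List.pyGet?_of_nonneg data hpc, hget])]
        split_ifs at hok with h1 h2 h3 h4
        · -- cpy
          rcases hsp : PySem.Str.split₀ (PySem.Str.slice ins (some 4) none) with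
            _ | ⟨v, _ | ⟨dst, _ | _⟩⟩ <;> rw [hsp] at hok <;> simp at hok
          obtain ⟨hv, hd⟩ := hok
          rw [compileIns_cpy ins v dst h1 hsp hv hd] at hmget
          rw [pvStep_cpy ins (mk4 a b c d) pc h1,
              pvCpy_eq (PySem.Str.slice ins (some 4) none) (mk4 a b c d) pc v dst hsp,
              altRun_succ_cpy _ f (a, b, c, d) pc (pvArgOf v) (regIdx dst) hnlt hmget,
              ← val_eq a b c d v hv]
          rcases regTok_cases dst hd with rfl | rfl | rfl | rfl
          · exact ih (pc + 1) _ b c d (Or.inl (by omega))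
          · exact ih (pc + 1) a _ c d (Or.inl (by omega))
          · exact ih (pc + 1) a b _ d (Or.inl (by omega))
          · exact ih (pc + 1) a b c _ (Or.inl (by omega))
        · -- inc
          rw [compileIns_inc ins h1 h2 hok] at hmget
          rw [pvStep_inc ins (mk4 a b c d) pc h1 h2,
              altRun_succ_inc _ f (a, b, c, d) pc _ hnlt hmget]
          unfold pvInc
          rcases regTok_cases _ hok with hst | hst | hst | hst <;> rw [hst]
          · exact ih (pc + 1) (a + 1) b c d (Or.inl (by omega))
          · exact ih (pc + 1) a (b + 1) c d (Or.inl (by omega))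
          · exact ih (pc + 1) a b (c + 1) d (Or.inl (by omega))
          · exact ih (pc + 1) a b c (d + 1) (Or.inl (by omega))
        · -- dec
          rw [compileIns_dec ins h1 h2 h3 hok] at hmget
          rw [pvStep_dec ins (mk4 a b c d) pc h1 h2 h3,
              altRun_succ_dec _ f (a, b, c, d) pc _ hnlt hmget]
          unfold pvDec
          rcases regTok_cases _ hok with hst | hst | hst | hst <;> rw [hst]
          · exact ih (pc + 1) (a - 1) b c d (Or.inl (by omega))
          · exact ih (pc + 1) a (b - 1) c d (Or.inl (by omega))
          · exact ih (pc + 1) a b (c - 1) d (Or.inl (by omega))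
          · exact ih (pc + 1) a b c (d - 1) (Or.inl (by omega))
        · -- jnz
          rcases hsp : PySem.Str.split₀ (PySem.Str.slice ins (some 4) none) with
            _ | ⟨r, _ | ⟨dist, _ | _⟩⟩ <;> rw [hsp] at hok <;> simp at hok
          obtain ⟨hr, hds'⟩ := hok
          rcases hds : PySem.Int.ofStr? dist with _ | k
          · rw [hds] at hds'; simp at hds'
          · have hland : 0 ≤ (pc.toNat : Int) + k ∨ (pc.toNat : Int) + k < -(data.length : Int) := by
              rw [hds] at hds'; simpa using hds'
            rw [hcast] at hland
            rw [compileIns_jnz ins r dist k h1 h2 h3 h4 hsp hds hr] at hmget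
            rw [pvStep_jnz ins (mk4 a b c d) pc h1 h2 h3 h4,
                pvJnz_eq (PySem.Str.slice ins (some 4) none) (mk4 a b c d) pc r dist hsp,
                altRun_succ_jnz _ f (a, b, c, d) pc (pvArgOf r) k hnlt hmget,
                val_eq a b c d r hr, hds, Option.getD_some]
            by_cases hz : argValB (a, b, c, d) (pvArgOf r) ≠ 0
            · rw [if_pos hz, if_pos hz]
              exact ih (pc + k) a b c d (by omega)
            · rw [if_neg hz, if_neg hz]
              exact ih (pc + 1) a b c d (Or.inl (by omega))
    · -- pc below -len: A's data[pc] raises IndexError, B's bound check stops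
      have hnone : PySem.List.pyGet? data pc = none := by
        rw [PySem.List.pyGet?_eq_none_iff, PySem.Raise.InRange]; omega
      rw [pvRun_succ_none data f _ pc hnone,
          altRun_succ_out _ f _ pc (Or.inl (by omega))]
      rfl

-- ===== VERDICT (by name: the statement is the Claim_ definition above) =====
theorem solve_spec : Claim_equal_solve := by
  intro data c _hdom hpre
  unfold Spec_solve solve solve_alt
  have h := run_eq data hpre pvFuel 0 0 0 c 0 (Or.inl (by omega))
  simpa [mk4] using h
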